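-- pv_equiv track=rewrite | github.com/memesmith0/fastlisp | fastlisp-compiler-0.5.py | process_binary2
-- ===== SOURCE A (Python) =====
-- def process_binary2(binary_str):
--     result = ""
--     for bit in binary_str:
--         if bit == "0":
--             result += "((lambda x (lambda y (lambda z (z x y)))) (lambda x (lambda y x))"
--         elif bit == "1":
--             result += "((lambda x (lambda y (lambda z (z x y)))) (lambda x (lambda y y))"
--     result += "(lambda x (lambda y y))"  # Append the additional lambda expression
--     result += ")" * (len(binary_str))  # Append the right parentheses
--     return result
-- ===== SOURCE B (Python) =====
-- CONS_FALSE = "((lambda x (lambda y (lambda z (z x y)))) (lambda x (lambda y x))"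
-- CONS_TRUE = "((lambda x (lambda y (lambda z (z x y)))) (lambda x (lambda y y))"
-- NIL = "(lambda x (lambda y y))"
--
-- def _prefix(bit):
--     if bit == "0":
--         return CONS_FALSE
--     if bit == "1":
--         return CONS_TRUE
--     return ""
--
-- def process_binary2(binary_str):
--     acc = NIL
--     for bit in reversed(binary_str):
--         acc = _prefix(bit) + acc + ")"
--     return acc
-- ===== Notes on version B (the rewrite author's own statement) =====
-- stated objective: alternative
-- what changed: B builds the nested cons expression from the inside out: starting from the NIL string it walks the bits in reverse, at each step prepending the bit's cons chunk and appending one closing parenthesis, instead of A's forward concatenation followed by separate NIL-append and closing-parenthesis-run steps.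
import Mathlib
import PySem

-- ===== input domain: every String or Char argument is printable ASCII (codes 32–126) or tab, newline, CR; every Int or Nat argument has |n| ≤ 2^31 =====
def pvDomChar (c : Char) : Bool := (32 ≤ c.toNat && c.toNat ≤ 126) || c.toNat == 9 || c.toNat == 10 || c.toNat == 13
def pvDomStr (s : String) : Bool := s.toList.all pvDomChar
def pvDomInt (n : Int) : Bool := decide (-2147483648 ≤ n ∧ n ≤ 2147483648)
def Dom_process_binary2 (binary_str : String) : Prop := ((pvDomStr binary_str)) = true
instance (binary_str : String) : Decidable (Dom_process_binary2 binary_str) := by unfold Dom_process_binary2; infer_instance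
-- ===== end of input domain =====

-- ===== PORT A =====
-- B differs only in construction order; one honest line: B builds the nested
-- cons expression inside-out by a reverse fold instead of A's forward
-- concatenation plus separate NIL and closing-parenthesis-run appends.
-- Python string concatenation is ported over List Char (String.mk at the end).
def pvChunk0 : List Char := "((lambda x (lambda y (lambda z (z x y)))) (lambda x (lambda y x))".toList
def pvChunk1 : List Char := "((lambda x (lambda y (lambda z (z x y)))) (lambda x (lambda y y))".toList
def pvNil : List Char := "(lambda x (lambda y y))".toList

def process_binary2 (binary_str : String) : String :=
  let result : List Char :=
    binary_str.toList.foldl (fun r bit =>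
      if bit = '0' then r ++ pvChunk0
      else if bit = '1' then r ++ pvChunk1
      else r) []
  let result := result ++ pvNil
  let result := result ++ List.replicate binary_str.toList.length ')'
  String.mk result

-- ===== PORT B =====
def pvPrefix (bit : Char) : List Char :=
  if bit = '0' then pvChunk0
  else if bit = '1' then pvChunk1
  else []

def process_binary2_alt (binary_str : String) : String :=
  String.mk (binary_str.toList.reverse.foldl
    (fun acc bit => pvPrefix bit ++ acc ++ [')']) pvNil)

-- ===== PRECONDITION & SPEC =====
def Spec_process_binary2 (binary_str : String) (out : String) : Prop := out = process_binary2_alt binary_str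
instance (binary_str : String) (out : String) : Decidable (Spec_process_binary2 binary_str out) := by unfold Spec_process_binary2; infer_instance

-- ===== CLAIM (what is proved, stated in full; the proofs are below) =====
def Claim_equal_process_binary2 : Prop := ∀ (binary_str : String), Dom_process_binary2 binary_str → Spec_process_binary2 binary_str (process_binary2 binary_str)

-- ===== LEMMAS AND PROOFS =====

-- A's forward fold just appends one chunk per character.
theorem pvFoldA (l : List Char) (r : List Char) :
    l.foldl (fun r bit =>
      if bit = '0' then r ++ pvChunk0
      else if bit = '1' then r ++ pvChunk1
      else r) r = r ++ (l.map pvPrefix).flatten := by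
  induction l generalizing r with
  | nil => simp
  | cons c t ih =>
    simp only [List.foldl, List.map, List.flatten, ih, pvPrefix]
    split_ifs <;> simp

-- B's reverse fold (= foldr) produces A's shape.
theorem pvFoldB (l : List Char) :
    l.reverse.foldl (fun acc bit => pvPrefix bit ++ acc ++ [')']) pvNil
      = (l.map pvPrefix).flatten ++ pvNil ++ List.replicate l.length ')' := by
  rw [List.foldl_reverse]
  induction l with
  | nil => simp
  | cons c t ih =>
    simp only [List.foldr, ih, List.map, List.flatten, List.length,
      List.replicate_succ']
    simp [List.append_assoc]

-- ===== VERDICT (by name: the statement is the Claim_ definition above) =====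
theorem process_binary2_spec : Claim_equal_process_binary2 := by
  intro s _
  unfold Spec_process_binary2 process_binary2 process_binary2_alt
  rw [pvFoldA, pvFoldB]
  simp
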